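-- pv_equiv track=rewrite | github.com/cryptoque/Advent_of_code_2024 | day21/day21.py | create_keypad
-- ===== SOURCE A (Python) =====
-- def create_keypad(layout):
--     keypad = {}
--     for y, row in enumerate(layout):
--         for x, button in enumerate(row):
--             if button == '#':
--                 continue
--             neighbors = {}
--             for dx, dy, move in [(-1, 0, '<'), (1, 0, '>'), (0, -1, '^'), (0, 1, 'v')]:
--                 nx, ny = x + dx, y + dy
--                 if 0 <= ny < len(layout) and 0 <= nx < len(layout[ny]) and layout[ny][nx] != '#':
--                     neighbors[move] = layout[ny][nx]
--             keypad[button] = neighbors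
--     return keypad
-- ===== SOURCE B (Python) =====
-- def create_keypad(layout):
--     # Stage 1: harvest adjacency edges by zipping each row (and each pair of
--     # consecutive rows) with its shifted self: horiz[(x, y)] = (row[x], row[x+1])
--     # for each horizontally adjacent non-'#' pair, vert likewise per column.
--     horiz = {(x, y): ab
--              for y, row in enumerate(layout)
--              for x, ab in enumerate(zip(row, row[1:]))
--              if ab[0] != '#' and ab[1] != '#'}
--     vert = {(x, y): ab
--             for y, rr in enumerate(zip(layout, layout[1:]))
--             for x, ab in enumerate(zip(rr[0], rr[1]))
--             if ab[0] != '#' and ab[1] != '#'}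
--     # Stage 2: assemble the keypad purely from the edge tables.
--     keypad = {}
--     hg = horiz.get
--     vg = vert.get
--     for y, row in enumerate(layout):
--         for x, button in enumerate(row):
--             if button != '#':
--                 nb = {}
--                 e = hg((x - 1, y))
--                 if e is not None:
--                     nb['<'] = e[0]
--                 e = hg((x, y))
--                 if e is not None:
--                     nb['>'] = e[1]
--                 e = vg((x, y - 1))
--                 if e is not None:
--                     nb['^'] = e[0]
--                 e = vg((x, y))
--                 if e is not None:
--                     nb['v'] = e[1]
--                 keypad[button] = nb
--     return keypad
-- ===== Notes on version B (the rewrite author's own statement) =====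
-- stated objective: alternative
-- what changed: B replaces A's per-cell four-direction probing with bounds checks by staged edge extraction: one pass zips each row with its shifted self (and each pair of consecutive rows) to build a horizontal and a vertical edge table keyed by coordinate, and a second pass assembles each button's neighbors purely by lookups in those tables.
import Mathlib
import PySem

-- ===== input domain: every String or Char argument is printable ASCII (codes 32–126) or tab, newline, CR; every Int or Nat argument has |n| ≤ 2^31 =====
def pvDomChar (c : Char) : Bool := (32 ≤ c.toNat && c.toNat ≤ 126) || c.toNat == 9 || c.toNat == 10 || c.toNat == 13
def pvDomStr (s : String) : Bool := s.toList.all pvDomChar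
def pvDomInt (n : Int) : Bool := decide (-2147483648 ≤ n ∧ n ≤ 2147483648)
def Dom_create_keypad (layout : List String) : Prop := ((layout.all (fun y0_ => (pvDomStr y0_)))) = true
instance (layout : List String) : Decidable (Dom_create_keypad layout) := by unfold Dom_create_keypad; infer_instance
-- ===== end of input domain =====

-- B replaces A's per-cell four-direction probing (bounds checks + grid re-reads) by staged
-- edge extraction: a horizontal and a vertical edge table harvested by zipping rows / consecutive
-- row pairs with their shifted selves, then an assembly pass by table lookup; objective: alternative (same cost).


-- ===== PORT A =====
def pvDirsA : List (Int × Int × String) := [(-1, 0, "<"), (1, 0, ">"), (0, -1, "^"), (0, 1, "v")]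

-- A's inner neighbor loop.  layout[ny] / layout[ny][nx] are only read under A's explicit
-- bounds checks, so the pyGetD defaults are never used (exact transliteration of the guarded access).
def pvNeighborsA (layout : List String) (x y : Int) : PySem.Dict String String :=
  pvDirsA.foldl (fun neighbors m =>
    let nx := x + m.1
    let ny := y + m.2.1
    if 0 ≤ ny ∧ ny < (layout.length : Int) then
      let row := (PySem.List.pyGetD layout ny "").toList
      if 0 ≤ nx ∧ nx < (row.length : Int) then
        if PySem.List.pyGetD row nx '#' ≠ '#' then
          neighbors.insert m.2.2 (PySem.List.pyGetD row nx '#').toString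
        else neighbors
      else neighbors
    else neighbors) PySem.Dict.empty

def create_keypad (layout : List String) : List (String × List (String × String)) :=
  ((PySem.List.enumerate layout).foldl (fun keypad yrow =>
    (PySem.List.enumerate yrow.2.toList).foldl (fun keypad xb =>
      if xb.2 = '#' then keypad
      else keypad.insert xb.2.toString (pvNeighborsA layout xb.1 yrow.1).items) keypad)
    PySem.Dict.empty).items

-- ===== PORT B =====
-- B's two edge-extraction passes: each dict comprehension zips a sequence with its shifted self
-- (row with row[1:], the row list with its own tail) and records each surviving adjacent pair.
def pvHoriz (layout : List String) : PySem.Dict (Int × Int) (String × String) :=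
  (PySem.List.enumerate layout).foldl (fun d yr =>
    (PySem.List.enumerate (yr.2.toList.zip yr.2.toList.tail)).foldl (fun d p =>
      if p.2.1 ≠ '#' ∧ p.2.2 ≠ '#' then d.insert (p.1, yr.1) (p.2.1.toString, p.2.2.toString)
      else d) d)
    PySem.Dict.empty

def pvVert (layout : List String) : PySem.Dict (Int × Int) (String × String) :=
  (PySem.List.enumerate (layout.zip layout.tail)).foldl (fun d yr =>
    (PySem.List.enumerate (yr.2.1.toList.zip yr.2.2.toList)).foldl (fun d p =>
      if p.2.1 ≠ '#' ∧ p.2.2 ≠ '#' then d.insert (p.1, yr.1) (p.2.1.toString, p.2.2.toString)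
      else d) d)
    PySem.Dict.empty

-- B's per-cell assembly: '.get' returning None or the edge pair is exactly Option.
def pvNeighborsB (horiz vert : PySem.Dict (Int × Int) (String × String)) (x y : Int) :
    PySem.Dict String String :=
  let nb : PySem.Dict String String := PySem.Dict.empty
  let nb := match horiz.get? (x - 1, y) with
    | some e => nb.insert "<" e.1
    | none => nb
  let nb := match horiz.get? (x, y) with
    | some e => nb.insert ">" e.2
    | none => nb
  let nb := match vert.get? (x, y - 1) with
    | some e => nb.insert "^" e.1
    | none => nb
  match vert.get? (x, y) with
  | some e => nb.insert "v" e.2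
  | none => nb

def create_keypad_alt (layout : List String) : List (String × List (String × String)) :=
  let horiz := pvHoriz layout
  let vert := pvVert layout
  ((PySem.List.enumerate layout).foldl (fun keypad yr =>
    (PySem.List.enumerate yr.2.toList).foldl (fun keypad xb =>
      if xb.2 ≠ '#' then
        keypad.insert xb.2.toString (pvNeighborsB horiz vert xb.1 yr.1).items
      else keypad) keypad)
    PySem.Dict.empty).items

-- ===== PRECONDITION & SPEC =====
def Spec_create_keypad (layout : List String) (out : List (String × List (String × String))) : Prop := out = create_keypad_alt layout
instance (layout : List String) (out : List (String × List (String × String))) : Decidable (Spec_create_keypad layout out) := by unfold Spec_create_keypad; infer_instance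

-- ===== CLAIM (what is proved, stated in full; the proofs are below) =====
def Claim_equal_create_keypad : Prop := ∀ (layout : List String), Dom_create_keypad layout → Spec_create_keypad layout (create_keypad layout)

-- ===== LEMMAS AND PROOFS =====

-- An if-guarded insert loop is an insert loop over the filtered, mapped entry list.
theorem pvFoldl_if_insert {α κ ν : Type} [BEq κ] (l : List α) (c : α → Prop) [DecidablePred c]
    (k : α → κ) (v : α → ν) (d : PySem.Dict κ ν) :
    l.foldl (fun d a => if c a then d.insert (k a) (v a) else d) d
      = ((l.filter (fun a => decide (c a))).map (fun a => (k a, v a))).foldl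
          (fun d kv => d.insert kv.1 kv.2) d := by
  rw [List.foldl_map, List.foldl_filter]
  congr 1
  funext d a
  by_cases h : c a <;> simp [h]

-- x-indices surviving a filter of an enumeration stay strictly increasing, hence (g injective-on-<) nodup.
theorem pvEnumFilterFst_nodup {α : Type} (l : List α) (q : Int × α → Bool) (g : Int → Int)
    (hg : ∀ a b : Int, a < b → g a ≠ g b) :
    (((PySem.List.enumerate l).filter q).map (fun p => g p.1)).Nodup := by
  have h1 := PySem.List.pairwise_lt_enumerate (xs := l) (s := 0)
  have h2 := List.Pairwise.sublist (List.filter_sublist (l := PySem.List.enumerate l) (p := q)) h1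
  exact h2.map _ (fun a b hab => hg _ _ hab)

-- Generic staged-pass builder: a double insert loop over per-outer-step entry lists whose keys
-- carry the (shifted) outer index appends all entries in order and keeps keys unique.
theorem pvTable_aux {σ ν : Type} (L : List σ) (c : Int)
    (f : Int → σ → List ((Int × Int) × ν))
    (hy : ∀ s r p, p ∈ f s r → p.1.2 = s + c)
    (hx : ∀ s r, ((f s r).map (fun p => p.1.1)).Nodup)
    (s : Int) (d : PySem.Dict (Int × Int) ν)
    (hnd : d.keys.Nodup) (hlt : ∀ k ∈ d.keys, k.2 < s + c) :
    (((PySem.List.enumerate L s).foldl (fun d yr =>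
        (f yr.1 yr.2).foldl (fun d kv => d.insert kv.1 kv.2) d) d).items
      = d.items ++ (PySem.List.enumerate L s).flatMap (fun yr => f yr.1 yr.2))
    ∧ ((PySem.List.enumerate L s).foldl (fun d yr =>
        (f yr.1 yr.2).foldl (fun d kv => d.insert kv.1 kv.2) d) d).keys.Nodup := by
  induction L generalizing s d with
  | nil => exact ⟨by simp [PySem.List.enumerate_nil], by simpa [PySem.List.enumerate_nil] using hnd⟩
  | cons r rs ih =>
    rw [PySem.List.enumerate_cons]
    simp only [List.foldl_cons, List.flatMap_cons]
    generalize hl : f s r = l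
    have hkl : ∀ p ∈ l, p.1.2 = s + c := fun p hp => hy s r p (hl ▸ hp)
    have hxl : (l.map (fun p => p.1.1)).Nodup := hl ▸ hx s r
    have hknodup : (l.map (fun p : (Int × Int) × ν => p.1)).Nodup := by
      have : ((l.map (fun p : (Int × Int) × ν => p.1)).map (fun k => k.1)).Nodup := by
        rw [List.map_map]; exact hxl
      exact this.of_map _
    have hfresh : ∀ p ∈ l, d.contains (p.1 : Int × Int) = false := by
      intro p hp
      by_contra hc
      have hc' : d.contains p.1 = true := by cases h : d.contains p.1 <;> simp_all
      have := hlt _ ((PySem.Dict.contains_iff_mem_keys _ _).mp hc')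
      have := hkl p hp
      omega
    have hitems : (l.foldl (fun d kv => d.insert kv.1 kv.2) d).items = d.items ++ l := by
      have h := PySem.Dict.items_foldl_insert_fresh l (fun p : (Int × Int) × ν => p.1)
        (fun p : (Int × Int) × ν => p.2) d hfresh hknodup
      simpa using h
    have hkeys : (l.foldl (fun d kv => d.insert kv.1 kv.2) d).keys
        = d.keys ++ l.map (fun p => p.1) := by
      simp only [PySem.Dict.keys, hitems, List.map_append]
    have hnd' : (l.foldl (fun d kv => d.insert kv.1 kv.2) d).keys.Nodup := by
      rw [hkeys, List.nodup_append]
      refine ⟨hnd, hknodup, ?_⟩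
      intro k hk1 k2 hk2 heq
      obtain ⟨p, hp, hke⟩ := List.mem_map.mp hk2
      have h1 := hlt _ hk1
      have h2 := hkl p hp
      rw [heq, ← hke] at h1
      omega
    have hlt' : ∀ k ∈ (l.foldl (fun d kv => d.insert kv.1 kv.2) d).keys, k.2 < s + 1 + c := by
      intro k hk
      rw [hkeys] at hk
      rcases List.mem_append.mp hk with h | h
      · have := hlt _ h; omega
      · obtain ⟨p, hp, rfl⟩ := List.mem_map.mp h
        have := hkl p hp; omega
    obtain ⟨h1, h2⟩ := ih (s + 1) _ hnd' hlt'
    refine ⟨?_, h2⟩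
    rw [h1, hitems, List.append_assoc]

-- The entry lists of the four passes.
def pvEH {ν : Type} (layout : List String) (key : Int → Int → Int × Int) (val : Char × Char → ν) :
    List ((Int × Int) × ν) :=
  (PySem.List.enumerate layout).flatMap (fun yr =>
    ((PySem.List.enumerate (yr.2.toList.zip yr.2.toList.tail)).filter
        (fun p => decide (p.2.1 ≠ '#' ∧ p.2.2 ≠ '#'))).map
      (fun p => (key p.1 yr.1, val p.2)))

def pvEV {ν : Type} (layout : List String) (key : Int → Int → Int × Int) (val : Char × Char → ν) :
    List ((Int × Int) × ν) :=
  (PySem.List.enumerate (layout.zip layout.tail)).flatMap (fun yr =>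
    ((PySem.List.enumerate (yr.2.1.toList.zip yr.2.2.toList)).filter
        (fun p => decide (p.2.1 ≠ '#' ∧ p.2.2 ≠ '#'))).map
      (fun p => (key p.1 yr.1, val p.2)))

-- One staged pass, generically: items are the filtered/mapped entries in order, keys unique.
theorem pvPass_spec {σ ν : Type} (L : List σ) (rowf : σ → List (Char × Char)) (c : Int)
    (key : Int → Int → Int × Int) (val : Char × Char → ν)
    (hk2 : ∀ x y, (key x y).2 = y + c)
    (hk1 : ∀ y a b, a < b → (key a y).1 ≠ (key b y).1) :
    (((PySem.List.enumerate L).foldl (fun d yr =>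
        (PySem.List.enumerate (rowf yr.2)).foldl (fun d p =>
          if p.2.1 ≠ '#' ∧ p.2.2 ≠ '#' then d.insert (key p.1 yr.1) (val p.2) else d) d)
        PySem.Dict.empty).items
      = (PySem.List.enumerate L).flatMap (fun yr =>
          ((PySem.List.enumerate (rowf yr.2)).filter
              (fun p => decide (p.2.1 ≠ '#' ∧ p.2.2 ≠ '#'))).map
            (fun p => (key p.1 yr.1, val p.2))))
    ∧ ((PySem.List.enumerate L).foldl (fun d yr =>
        (PySem.List.enumerate (rowf yr.2)).foldl (fun d p =>
          if p.2.1 ≠ '#' ∧ p.2.2 ≠ '#' then d.insert (key p.1 yr.1) (val p.2) else d) d)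
        PySem.Dict.empty).keys.Nodup := by
  have he : ∀ (d : PySem.Dict (Int × Int) ν) (yr : Int × σ),
      (PySem.List.enumerate (rowf yr.2)).foldl (fun d p =>
        if p.2.1 ≠ '#' ∧ p.2.2 ≠ '#' then d.insert (key p.1 yr.1) (val p.2) else d) d
      = (((PySem.List.enumerate (rowf yr.2)).filter
            (fun p => decide (p.2.1 ≠ '#' ∧ p.2.2 ≠ '#'))).map
          (fun p => (key p.1 yr.1, val p.2))).foldl (fun d kv => d.insert kv.1 kv.2) d := by
    intro d yr
    exact pvFoldl_if_insert _ _ _ _ _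
  have hfe : (fun (d : PySem.Dict (Int × Int) ν) (yr : Int × σ) =>
      (PySem.List.enumerate (rowf yr.2)).foldl (fun d p =>
        if p.2.1 ≠ '#' ∧ p.2.2 ≠ '#' then d.insert (key p.1 yr.1) (val p.2) else d) d)
      = (fun d yr => (((PySem.List.enumerate (rowf yr.2)).filter
            (fun p => decide (p.2.1 ≠ '#' ∧ p.2.2 ≠ '#'))).map
          (fun p => (key p.1 yr.1, val p.2))).foldl (fun d kv => d.insert kv.1 kv.2) d) := by
    funext d yr; exact he d yr
  rw [hfe]
  have h := pvTable_aux L c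
    (fun s r => ((PySem.List.enumerate (rowf r)).filter
        (fun p => decide (p.2.1 ≠ '#' ∧ p.2.2 ≠ '#'))).map (fun p => (key p.1 s, val p.2)))
    (by
      intro s r p hp
      obtain ⟨q, hq, rfl⟩ := List.mem_map.mp hp
      exact hk2 q.1 s)
    (by
      intro s r
      rw [List.map_map]
      exact pvEnumFilterFst_nodup _ _ (fun x => (key x s).1) (fun a b hab => hk1 s a b hab))
    0 PySem.Dict.empty (by simp [PySem.Dict.keys_empty]) (by simp [PySem.Dict.keys_empty])
  obtain ⟨h1, h2⟩ := h
  exact ⟨by simpa using h1, h2⟩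

theorem pvHoriz_spec (layout : List String) :
    (pvHoriz layout).items
        = pvEH layout (fun x y => (x, y)) (fun ab => (ab.1.toString, ab.2.toString))
      ∧ (pvHoriz layout).keys.Nodup :=
  pvPass_spec layout (fun r => r.toList.zip r.toList.tail) 0 (fun x y => (x, y))
    (fun ab => (ab.1.toString, ab.2.toString)) (by intro x y; simp) (by intro y a b h; simp; omega)

theorem pvVert_spec (layout : List String) :
    (pvVert layout).items
        = pvEV layout (fun x y => (x, y)) (fun ab => (ab.1.toString, ab.2.toString))
      ∧ (pvVert layout).keys.Nodup :=
  pvPass_spec (layout.zip layout.tail) (fun r => r.1.toList.zip r.2.toList) 0 (fun x y => (x, y))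
    (fun ab => (ab.1.toString, ab.2.toString)) (by intro x y; simp) (by intro y a b h; simp; omega)

-- get? characterizations (the '#' and "" defaults make the out-of-range cases collapse).
theorem pvHoriz_get? (layout : List String) (j m : Nat) :
    (pvHoriz layout).get? ((m : Int), (j : Int))
      = if (layout.getD j "").toList.getD m '#' ≠ '#'
            ∧ (layout.getD j "").toList.getD (m + 1) '#' ≠ '#' then
          some (((layout.getD j "").toList.getD m '#').toString,
                ((layout.getD j "").toList.getD (m + 1) '#').toString)
        else none := by
  obtain ⟨hitems, hnd⟩ := pvHoriz_spec layout
  by_cases hc : (layout.getD j "").toList.getD m '#' ≠ '#'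
      ∧ (layout.getD j "").toList.getD (m + 1) '#' ≠ '#'
  · rw [if_pos hc]
    obtain ⟨ha, hb⟩ := hc
    have hj : j < layout.length := by
      by_contra h
      rw [List.getD_eq_default layout "" (by omega)] at ha
      simp at ha
    rw [List.getD_eq_getElem layout "" hj] at ha hb ⊢
    have hm1 : m + 1 < layout[j].toList.length := by
      by_contra h
      exact hb (List.getD_eq_default _ _ (by omega))
    rw [List.getD_eq_getElem _ _ (by omega)] at ha ⊢
    rw [List.getD_eq_getElem _ _ hm1] at hb ⊢
    have hzl : m < (layout[j].toList.zip layout[j].toList.tail).length := by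
      rw [List.length_zip, List.length_tail]; omega
    refine PySem.Dict.get?_of_mem_items _ ?_ hnd
    rw [hitems]
    refine List.mem_flatMap.mpr ⟨((0 : Int) + (j : Int), layout[j]), ?_, ?_⟩
    · exact (PySem.List.mem_enumerate_iff _ _ _).mpr ⟨j, hj, rfl⟩
    · refine List.mem_map.mpr
        ⟨((0 : Int) + (m : Int), (layout[j].toList.zip layout[j].toList.tail)[m]'hzl), ?_, ?_⟩
      · refine List.mem_filter.mpr ⟨(PySem.List.mem_enumerate_iff _ _ _).mpr ⟨m, hzl, rfl⟩, ?_⟩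
        simp [List.getElem_zip, List.getElem_tail, ha]
        exact hb
      · simp [List.getElem_zip, List.getElem_tail]
  · rw [if_neg hc]
    rw [PySem.Dict.get?_eq_none_iff_not_mem_keys]
    intro hk
    simp only [PySem.Dict.keys, hitems, pvEH, List.mem_map, List.mem_flatMap,
      List.mem_filter, PySem.List.mem_enumerate_iff] at hk
    obtain ⟨p, ⟨yr, ⟨k, hk', rfl⟩, q, ⟨⟨m', hm', rfl⟩, hcond⟩, rfl⟩, hkey⟩ := hk
    simp only [Prod.mk.injEq] at hkey
    have hkj : k = j := by omega
    have hmm : m' = m := by omega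
    subst hkj; subst hmm
    apply hc
    simp only [List.getElem_zip, List.getElem_tail, decide_eq_true_eq, ne_eq] at hcond
    have hzl := hm'
    simp only [List.length_zip, List.length_tail] at hzl
    rw [List.getD_eq_getElem layout "" hk', List.getD_eq_getElem _ _ (by omega),
      List.getD_eq_getElem _ _ (by omega)]
    exact hcond

theorem pvVert_get? (layout : List String) (k i : Nat) :
    (pvVert layout).get? ((i : Int), (k : Int))
      = if (layout.getD k "").toList.getD i '#' ≠ '#'
            ∧ (layout.getD (k + 1) "").toList.getD i '#' ≠ '#' then
          some (((layout.getD k "").toList.getD i '#').toString,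
                ((layout.getD (k + 1) "").toList.getD i '#').toString)
        else none := by
  obtain ⟨hitems, hnd⟩ := pvVert_spec layout
  by_cases hc : (layout.getD k "").toList.getD i '#' ≠ '#'
      ∧ (layout.getD (k + 1) "").toList.getD i '#' ≠ '#'
  · rw [if_pos hc]
    obtain ⟨ha, hb⟩ := hc
    have hk1 : k + 1 < layout.length := by
      by_contra h
      rw [List.getD_eq_default layout "" (by omega)] at hb
      simp at hb
    rw [List.getD_eq_getElem layout "" (by omega)] at ha ⊢
    rw [List.getD_eq_getElem layout "" hk1] at hb ⊢
    have hia : i < layout[k].toList.length := by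
      by_contra h
      exact ha (List.getD_eq_default _ _ (by omega))
    have hib : i < layout[k + 1].toList.length := by
      by_contra h
      exact hb (List.getD_eq_default _ _ (by omega))
    rw [List.getD_eq_getElem _ _ hia] at ha ⊢
    rw [List.getD_eq_getElem _ _ hib] at hb ⊢
    have hkz : k < (layout.zip layout.tail).length := by
      rw [List.length_zip, List.length_tail]; omega
    have hpair : (layout.zip layout.tail)[k]'hkz = (layout[k], layout[k + 1]) := by
      simp [List.getElem_zip, List.getElem_tail]
    refine PySem.Dict.get?_of_mem_items _ ?_ hnd
    rw [hitems]
    refine List.mem_flatMap.mpr ⟨((0 : Int) + (k : Int), (layout.zip layout.tail)[k]'hkz), ?_, ?_⟩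
    · exact (PySem.List.mem_enumerate_iff _ _ _).mpr ⟨k, hkz, rfl⟩
    · rw [hpair]
      have hzi : i < (layout[k].toList.zip layout[k + 1].toList).length := by
        rw [List.length_zip]; omega
      refine List.mem_map.mpr
        ⟨((0 : Int) + (i : Int), (layout[k].toList.zip layout[k + 1].toList)[i]'hzi), ?_, ?_⟩
      · refine List.mem_filter.mpr ⟨(PySem.List.mem_enumerate_iff _ _ _).mpr ⟨i, hzi, rfl⟩, ?_⟩
        simp [List.getElem_zip, ha]
        exact hb
      · simp [List.getElem_zip]
  · rw [if_neg hc]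
    rw [PySem.Dict.get?_eq_none_iff_not_mem_keys]
    intro hk
    simp only [PySem.Dict.keys, hitems, pvEV, List.mem_map, List.mem_flatMap,
      List.mem_filter, PySem.List.mem_enumerate_iff] at hk
    obtain ⟨p, ⟨yr, ⟨k', hk', rfl⟩, q, ⟨⟨m, hm, rfl⟩, hcond⟩, rfl⟩, hkey⟩ := hk
    simp only [Prod.mk.injEq] at hkey
    have hkz := hk'
    rw [List.length_zip, List.length_tail] at hkz
    have hpair : (layout.zip layout.tail)[k']'hk' = (layout[k'], layout[k' + 1]) := by
      simp [List.getElem_zip, List.getElem_tail]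
    have hml : m < layout[k'].toList.length ∧ m < layout[k' + 1].toList.length := by
      have h := hm
      simp only [hpair, List.length_zip] at h
      omega
    have hcond' : layout[k'].toList[m]'hml.1 ≠ '#' ∧ layout[k' + 1].toList[m]'hml.2 ≠ '#' := by
      have h := hcond
      simp only [hpair, List.getElem_zip, decide_eq_true_eq, ne_eq] at h
      exact h
    have hkk : k' = k := by omega
    have hmi : m = i := by omega
    subst hkk; subst hmi
    apply hc
    constructor
    · rw [List.getD_eq_getElem layout "" (by omega), List.getD_eq_getElem _ _ hml.1]
      exact hcond'.1
    · rw [List.getD_eq_getElem layout "" (by omega), List.getD_eq_getElem _ _ hml.2]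
      exact hcond'.2

-- Keys of the edge tables are coordinates, hence never negative.
theorem pvHoriz_get?_neg (layout : List String) (x y : Int) (h : x < 0 ∨ y < 0) :
    (pvHoriz layout).get? (x, y) = none := by
  obtain ⟨hitems, hnd⟩ := pvHoriz_spec layout
  rw [PySem.Dict.get?_eq_none_iff_not_mem_keys]
  intro hk
  simp only [PySem.Dict.keys, hitems, pvEH, List.mem_map, List.mem_flatMap,
    List.mem_filter, PySem.List.mem_enumerate_iff] at hk
  obtain ⟨p, ⟨yr, ⟨k, hk', rfl⟩, q, ⟨⟨m, hm, rfl⟩, hcond⟩, rfl⟩, hkey⟩ := hk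
  simp only [Prod.mk.injEq] at hkey
  omega

theorem pvVert_get?_neg (layout : List String) (x y : Int) (h : x < 0 ∨ y < 0) :
    (pvVert layout).get? (x, y) = none := by
  obtain ⟨hitems, hnd⟩ := pvVert_spec layout
  rw [PySem.Dict.get?_eq_none_iff_not_mem_keys]
  intro hk
  simp only [PySem.Dict.keys, hitems, pvEV, List.mem_map, List.mem_flatMap,
    List.mem_filter, PySem.List.mem_enumerate_iff] at hk
  obtain ⟨p, ⟨yr, ⟨k, hk', rfl⟩, q, ⟨⟨m, hm, rfl⟩, hcond⟩, rfl⟩, hkey⟩ := hk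
  simp only [Prod.mk.injEq] at hkey
  omega

-- A's four probe steps, rewritten to the collapsed guard forms.
theorem pvStepA_left (layout : List String) (j i : Nat) (hj : j < layout.length)
    (hi : i < layout[j].toList.length) (nb : PySem.Dict String String) :
    (if 0 ≤ (j : Int) + 0 ∧ (j : Int) + 0 < (layout.length : Int) then
      if 0 ≤ (i : Int) + -1 ∧ (i : Int) + -1 < ((PySem.List.pyGetD layout ((j : Int) + 0) "").toList.length : Int) then
        if PySem.List.pyGetD (PySem.List.pyGetD layout ((j : Int) + 0) "").toList ((i : Int) + -1) '#' ≠ '#' then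
          nb.insert "<" (PySem.List.pyGetD (PySem.List.pyGetD layout ((j : Int) + 0) "").toList ((i : Int) + -1) '#').toString
        else nb
      else nb
    else nb)
    = if 1 ≤ i ∧ layout[j].toList.getD (i - 1) '#' ≠ '#' then
        nb.insert "<" (layout[j].toList.getD (i - 1) '#').toString
      else nb := by
  have hrow : (PySem.List.pyGetD layout ((j : Int) + 0) "").toList = layout[j].toList := by
    rw [show (j : Int) + 0 = ((j : Nat) : Int) by ring, PySem.List.pyGetD_natCast,
      List.getD_eq_getElem _ _ hj]
  rw [hrow, if_pos (show (0 : Int) ≤ (j : Int) + 0 ∧ (j : Int) + 0 < (layout.length : Int) from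
    ⟨by omega, by omega⟩)]
  by_cases h1 : 1 ≤ i
  · rw [if_pos (show (0 : Int) ≤ (i : Int) + -1 ∧ (i : Int) + -1 < (layout[j].toList.length : Int)
        from ⟨by omega, by omega⟩),
      show (i : Int) + -1 = ((i - 1 : Nat) : Int) by omega, PySem.List.pyGetD_natCast]
    by_cases h2 : layout[j].toList.getD (i - 1) '#' ≠ '#'
    · rw [if_pos h2, if_pos ⟨h1, h2⟩]
    · rw [if_neg h2, if_neg (by tauto)]
  · rw [if_neg (by omega), if_neg (fun hcc => h1 hcc.1)]

theorem pvStepA_right (layout : List String) (j i : Nat) (hj : j < layout.length)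
    (hi : i < layout[j].toList.length) (nb : PySem.Dict String String) :
    (if 0 ≤ (j : Int) + 0 ∧ (j : Int) + 0 < (layout.length : Int) then
      if 0 ≤ (i : Int) + 1 ∧ (i : Int) + 1 < ((PySem.List.pyGetD layout ((j : Int) + 0) "").toList.length : Int) then
        if PySem.List.pyGetD (PySem.List.pyGetD layout ((j : Int) + 0) "").toList ((i : Int) + 1) '#' ≠ '#' then
          nb.insert ">" (PySem.List.pyGetD (PySem.List.pyGetD layout ((j : Int) + 0) "").toList ((i : Int) + 1) '#').toString
        else nb
      else nb
    else nb)
    = if layout[j].toList.getD (i + 1) '#' ≠ '#' then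
        nb.insert ">" (layout[j].toList.getD (i + 1) '#').toString
      else nb := by
  have hrow : (PySem.List.pyGetD layout ((j : Int) + 0) "").toList = layout[j].toList := by
    rw [show (j : Int) + 0 = ((j : Nat) : Int) by ring, PySem.List.pyGetD_natCast,
      List.getD_eq_getElem _ _ hj]
  rw [hrow, if_pos (show (0 : Int) ≤ (j : Int) + 0 ∧ (j : Int) + 0 < (layout.length : Int) from
    ⟨by omega, by omega⟩)]
  by_cases h1 : i + 1 < layout[j].toList.length
  · rw [if_pos (show (0 : Int) ≤ (i : Int) + 1 ∧ (i : Int) + 1 < (layout[j].toList.length : Int)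
        from ⟨by omega, by omega⟩),
      show (i : Int) + 1 = ((i + 1 : Nat) : Int) by push_cast; ring, PySem.List.pyGetD_natCast]
  · rw [if_neg (by omega),
      if_neg (fun hcc => hcc (List.getD_eq_default _ _ (by omega)))]

theorem pvStepA_up (layout : List String) (j i : Nat) (hj : j < layout.length)
    (_hi : i < layout[j].toList.length) (nb : PySem.Dict String String) :
    (if 0 ≤ (j : Int) + -1 ∧ (j : Int) + -1 < (layout.length : Int) then
      if 0 ≤ (i : Int) + 0 ∧ (i : Int) + 0 < ((PySem.List.pyGetD layout ((j : Int) + -1) "").toList.length : Int) then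
        if PySem.List.pyGetD (PySem.List.pyGetD layout ((j : Int) + -1) "").toList ((i : Int) + 0) '#' ≠ '#' then
          nb.insert "^" (PySem.List.pyGetD (PySem.List.pyGetD layout ((j : Int) + -1) "").toList ((i : Int) + 0) '#').toString
        else nb
      else nb
    else nb)
    = if 1 ≤ j ∧ (layout.getD (j - 1) "").toList.getD i '#' ≠ '#' then
        nb.insert "^" ((layout.getD (j - 1) "").toList.getD i '#').toString
      else nb := by
  by_cases hj1 : 1 ≤ j
  · rw [if_pos (show (0 : Int) ≤ (j : Int) + -1 ∧ (j : Int) + -1 < (layout.length : Int) from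
      ⟨by omega, by omega⟩),
      show (j : Int) + -1 = ((j - 1 : Nat) : Int) by omega, PySem.List.pyGetD_natCast]
    by_cases h1 : i < (layout.getD (j - 1) "").toList.length
    · rw [if_pos (show (0 : Int) ≤ (i : Int) + 0
          ∧ (i : Int) + 0 < ((layout.getD (j - 1) "").toList.length : Int) from ⟨by omega, by omega⟩),
        show (i : Int) + 0 = ((i : Nat) : Int) by ring, PySem.List.pyGetD_natCast]
      by_cases h2 : (layout.getD (j - 1) "").toList.getD i '#' ≠ '#'
      · rw [if_pos h2, if_pos ⟨hj1, h2⟩]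
      · rw [if_neg h2, if_neg (by tauto)]
    · rw [if_neg (by omega),
        if_neg (fun hcc => hcc.2 (List.getD_eq_default _ _ (by omega)))]
  · rw [if_neg (by omega), if_neg (fun hcc => hj1 hcc.1)]

theorem pvStepA_down (layout : List String) (j i : Nat) (hj : j < layout.length)
    (_hi : i < layout[j].toList.length) (nb : PySem.Dict String String) :
    (if 0 ≤ (j : Int) + 1 ∧ (j : Int) + 1 < (layout.length : Int) then
      if 0 ≤ (i : Int) + 0 ∧ (i : Int) + 0 < ((PySem.List.pyGetD layout ((j : Int) + 1) "").toList.length : Int) then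
        if PySem.List.pyGetD (PySem.List.pyGetD layout ((j : Int) + 1) "").toList ((i : Int) + 0) '#' ≠ '#' then
          nb.insert "v" (PySem.List.pyGetD (PySem.List.pyGetD layout ((j : Int) + 1) "").toList ((i : Int) + 0) '#').toString
        else nb
      else nb
    else nb)
    = if (layout.getD (j + 1) "").toList.getD i '#' ≠ '#' then
        nb.insert "v" ((layout.getD (j + 1) "").toList.getD i '#').toString
      else nb := by
  by_cases hj1 : j + 1 < layout.length
  · rw [if_pos (show (0 : Int) ≤ (j : Int) + 1 ∧ (j : Int) + 1 < (layout.length : Int) from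
      ⟨by omega, by omega⟩),
      show (j : Int) + 1 = ((j + 1 : Nat) : Int) by push_cast; ring, PySem.List.pyGetD_natCast]
    by_cases h1 : i < (layout.getD (j + 1) "").toList.length
    · rw [if_pos (show (0 : Int) ≤ (i : Int) + 0
          ∧ (i : Int) + 0 < ((layout.getD (j + 1) "").toList.length : Int) from ⟨by omega, by omega⟩),
        show (i : Int) + 0 = ((i : Nat) : Int) by ring, PySem.List.pyGetD_natCast]
    · rw [if_neg (by omega),
        if_neg (fun hcc => hcc (List.getD_eq_default _ _ (by omega)))]
  · rw [if_neg (by omega),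
      if_neg (fun hcc => hcc (by
        rw [List.getD_eq_default layout "" (by omega)]
        rfl))]

-- The per-cell neighbor dicts agree.
theorem pvCell_eq (layout : List String) (j i : Nat) (hj : j < layout.length)
    (hi : i < layout[j].toList.length) (hb : layout[j].toList[i] ≠ '#') :
    pvNeighborsB (pvHoriz layout) (pvVert layout) (i : Int) (j : Int)
      = pvNeighborsA layout (i : Int) (j : Int) := by
  have hga : layout[j].toList.getD i '#' = layout[j].toList[i] := List.getD_eq_getElem _ _ hi
  have hL : (pvHoriz layout).get? ((i : Int) - 1, (j : Int))
      = if 1 ≤ i ∧ layout[j].toList.getD (i - 1) '#' ≠ '#' then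
          some ((layout[j].toList.getD (i - 1) '#').toString,
                (layout[j].toList.getD i '#').toString)
        else none := by
    rcases Nat.eq_zero_or_pos i with h0 | h1
    · subst h0
      rw [pvHoriz_get?_neg layout _ _ (by left; omega), if_neg (by omega)]
    · obtain ⟨m, rfl⟩ : ∃ m, i = m + 1 := ⟨i - 1, by omega⟩
      rw [show ((m + 1 : Nat) : Int) - 1 = ((m : Nat) : Int) by push_cast; ring,
        pvHoriz_get? layout j m, List.getD_eq_getElem layout "" hj]
      simp only [Nat.add_sub_cancel]
      have hgb : layout[j].toList.getD (m + 1) '#' ≠ '#' := by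
        rw [List.getD_eq_getElem _ _ hi]; exact hb
      exact if_congr ⟨fun h => ⟨by omega, h.1⟩, fun h => ⟨h.2, hgb⟩⟩ rfl rfl
  have hR : (pvHoriz layout).get? ((i : Int), (j : Int))
      = if layout[j].toList.getD (i + 1) '#' ≠ '#' then
          some ((layout[j].toList.getD i '#').toString,
                (layout[j].toList.getD (i + 1) '#').toString)
        else none := by
    rw [pvHoriz_get? layout j i, List.getD_eq_getElem layout "" hj]
    exact if_congr ⟨fun h => h.2, fun h => ⟨by rw [hga]; exact hb, h⟩⟩ rfl rfl
  have hU : (pvVert layout).get? ((i : Int), (j : Int) - 1)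
      = if 1 ≤ j ∧ (layout.getD (j - 1) "").toList.getD i '#' ≠ '#' then
          some ((((layout.getD (j - 1) "").toList.getD i '#').toString),
                (((layout.getD j "").toList.getD i '#').toString))
        else none := by
    rcases Nat.eq_zero_or_pos j with h0 | h1
    · subst h0
      rw [pvVert_get?_neg layout _ _ (by right; omega), if_neg (by omega)]
    · obtain ⟨k, rfl⟩ : ∃ k, j = k + 1 := ⟨j - 1, by omega⟩
      rw [show ((k + 1 : Nat) : Int) - 1 = ((k : Nat) : Int) by push_cast; ring,
        pvVert_get? layout k i]
      simp only [Nat.add_sub_cancel]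
      have hgb : (layout.getD (k + 1) "").toList.getD i '#' ≠ '#' := by
        rw [List.getD_eq_getElem layout "" hj, List.getD_eq_getElem _ _ hi]
        exact hb
      exact if_congr ⟨fun h => ⟨by omega, h.1⟩, fun h => ⟨h.2, hgb⟩⟩ rfl rfl
  have hD : (pvVert layout).get? ((i : Int), (j : Int))
      = if (layout.getD (j + 1) "").toList.getD i '#' ≠ '#' then
          some ((((layout.getD j "").toList.getD i '#').toString),
                (((layout.getD (j + 1) "").toList.getD i '#').toString))
        else none := by
    rw [pvVert_get? layout j i]
    have hgb : (layout.getD j "").toList.getD i '#' ≠ '#' := by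
      rw [List.getD_eq_getElem layout "" hj, List.getD_eq_getElem _ _ hi]
      exact hb
    exact if_congr ⟨fun h => h.2, fun h => ⟨hgb, h⟩⟩ rfl rfl
  simp only [pvNeighborsB]
  rw [hL, hR, hU, hD]
  simp only [pvNeighborsA, pvDirsA, List.foldl_cons, List.foldl_nil]
  rw [pvStepA_left layout j i hj hi, pvStepA_right layout j i hj hi,
    pvStepA_up layout j i hj hi, pvStepA_down layout j i hj hi]
  split_ifs <;> rfl

-- ===== VERDICT (by name: the statement is the Claim_ definition above) =====
theorem create_keypad_spec : Claim_equal_create_keypad := by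
  intro layout _
  unfold Spec_create_keypad
  rw [show create_keypad_alt layout
      = ((PySem.List.enumerate layout).foldl (fun keypad yr =>
          (PySem.List.enumerate yr.2.toList).foldl (fun keypad xb =>
            if xb.2 ≠ '#' then
              keypad.insert xb.2.toString
                (pvNeighborsB (pvHoriz layout) (pvVert layout) xb.1 yr.1).items
            else keypad) keypad)
          PySem.Dict.empty).items from rfl]
  unfold create_keypad
  congr 1
  apply PySem.List.foldl_congr_mem'
  intro yr hyr keypad
  obtain ⟨k, hk, rfl⟩ := (PySem.List.mem_enumerate_iff _ _ _).mp hyr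
  apply PySem.List.foldl_congr_mem'
  intro xb hxb keypad
  obtain ⟨m, hm, rfl⟩ := (PySem.List.mem_enumerate_iff _ _ _).mp hxb
  by_cases hb : layout[k].toList[m] = '#'
  · simp [hb]
  · rw [if_neg hb, if_pos hb]
    have hcell := pvCell_eq layout k m hk hm hb
    simp only [zero_add]
    rw [← hcell]
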